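-- pv_equiv track=rewrite | github.com/MicahRowlandMicrosoft/ssis_adf_agent | ssis_adf_agent/generators/linked_service_generator.py | _split_connection_string
-- ===== SOURCE A (Python) =====
-- def _split_connection_string(cs: str) -> list[str]:
--     """Split a connection string on semicolons, respecting quoted values.
--
--     Quotes (single or double) protect embedded semicolons.  A backslash does
--     **not** act as an escape character — OLE DB / ADO.NET connection strings
--     use doubled quotes for escaping, which this routine handles transparently.
--     """
--     segments: list[str] = []
--     current: list[str] = []
--     in_quote: str | None = None
--
--     for ch in cs:
--         if in_quote is not None:
--             current.append(ch)
--             if ch == in_quote: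
--                 in_quote = None
--         elif ch in ('"', "'"):
--             in_quote = ch
--             current.append(ch)
--         elif ch == ";":
--             segments.append("".join(current))
--             current = []
--         else:
--             current.append(ch)
--
--     if current:
--         segments.append("".join(current))
--     return segments
-- ===== SOURCE B (Python) =====
-- def _split_connection_string(cs: str) -> list[str]:
--     """Index-driven skip-scan: jump over quoted runs with str.find instead of a
--     per-character in_quote state machine."""
--     segments: list[str] = []
--     buf: list[str] = []
--     i = 0
--     n = len(cs)
--     while i < n:
--         ch = cs[i]
--         if ch in ('"', "'"):
--             j = cs.find(ch, i + 1)
--             if j == -1: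
--                 buf.append(cs[i:])
--                 i = n
--             else:
--                 buf.append(cs[i:j + 1])
--                 i = j + 1
--         elif ch == ";":
--             segments.append("".join(buf))
--             buf = []
--             i += 1
--         else:
--             buf.append(ch)
--             i += 1
--     if buf:
--         segments.append("".join(buf))
--     return segments
-- ===== Notes on version B (the rewrite author's own statement) =====
-- stated objective: alternative
-- what changed: Replaced the per-character quote-state machine (in_quote flag toggled inside one fold) with an index-driven skip-scan that, on seeing a quote, jumps straight past the whole quoted run via str.find and appends it as one slice.
import Mathlib
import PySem

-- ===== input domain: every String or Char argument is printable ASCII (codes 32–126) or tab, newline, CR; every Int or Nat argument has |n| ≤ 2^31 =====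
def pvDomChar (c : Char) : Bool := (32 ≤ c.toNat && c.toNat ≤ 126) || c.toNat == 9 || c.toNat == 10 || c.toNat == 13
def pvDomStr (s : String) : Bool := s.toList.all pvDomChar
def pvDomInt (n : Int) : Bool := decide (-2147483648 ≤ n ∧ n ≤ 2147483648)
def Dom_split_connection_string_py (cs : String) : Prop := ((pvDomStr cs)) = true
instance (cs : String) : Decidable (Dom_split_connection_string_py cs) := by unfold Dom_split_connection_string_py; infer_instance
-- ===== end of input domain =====

-- B replaces A's per-character in_quote state machine by an index-driven skip-scan that
-- jumps over each quoted run in one step (alternative decomposition, same linear cost).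

-- ===== PORT A =====
-- state: (segments, current, in_quote); one step of A's for-loop body
def pvAStep (st : List String × List Char × Option Char) (ch : Char) :
    List String × List Char × Option Char :=
  match st with
  | (segs, cur, some q) =>
      if ch == q then (segs, cur ++ [ch], none) else (segs, cur ++ [ch], some q)
  | (segs, cur, none) =>
      if ch == '"' || ch == '\'' then (segs, cur ++ [ch], some ch)
      else if ch == ';' then (segs ++ [String.ofList cur], [], none)
      else (segs, cur ++ [ch], none)

def split_connection_string_py (cs : String) : List String :=
  match cs.toList.foldl pvAStep ([], [], none) with
  | (segs, cur, _) => if cur.isEmpty then segs else segs ++ [String.ofList cur]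

-- ===== PORT B =====
-- skip-scan over the character list: on a quote, grab the whole quoted slice at once
-- (takeWhile/dropWhile = the str.find + slicing of Source B); ';' flushes buf; else append char
def pvBLoop (l : List Char) (buf : List Char) : List String :=
  match l with
  | [] => if buf.isEmpty then [] else [String.ofList buf]
  | c :: rest =>
      if c == '"' || c == '\'' then
        let pre := rest.takeWhile (fun x => !(x == c))
        match h : rest.dropWhile (fun x => !(x == c)) with
        | [] => [String.ofList (buf ++ c :: pre)]      -- no closing quote: consume to end
        | q :: rest' => pvBLoop rest' (buf ++ c :: (pre ++ [q]))
      else if c == ';' then String.ofList buf :: pvBLoop rest []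
      else pvBLoop rest (buf ++ [c])
termination_by l.length
decreasing_by
  · have h1 : (rest.dropWhile (fun x => !(x == c))).length ≤ rest.length :=
      List.length_dropWhile_le _ _
    rw [h] at h1
    simp at h1 ⊢
    omega
  · simp
  · simp

def split_connection_string_py_alt (cs : String) : List String :=
  pvBLoop cs.toList []

-- ===== PRECONDITION & SPEC =====
def Spec_split_connection_string_py (cs : String) (out : List String) : Prop := out = split_connection_string_py_alt cs
instance (cs : String) (out : List String) : Decidable (Spec_split_connection_string_py cs out) := by unfold Spec_split_connection_string_py; infer_instance

-- ===== CLAIM (what is proved, stated in full; the proofs are below) =====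
def Claim_equal_split_connection_string_py : Prop := ∀ (cs : String), Dom_split_connection_string_py cs → Spec_split_connection_string_py cs (split_connection_string_py cs)

-- ===== LEMMAS AND PROOFS =====

-- finishing step of A (after the fold)
def pvAFin (st : List String × List Char × Option Char) : List String :=
  match st with
  | (segs, cur, _) => if cur.isEmpty then segs else segs ++ [String.ofList cur]

-- step-reduction lemmas for A's loop body
lemma pvAStep_none_quote (segs : List String) (cur : List Char) (c : Char)
    (h : (c == '"' || c == '\'') = true) :
    pvAStep (segs, cur, none) c = (segs, cur ++ [c], some c) := by
  simp [pvAStep, h]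

lemma pvAStep_none_semi (segs : List String) (cur : List Char) :
    pvAStep (segs, cur, none) ';' = (segs ++ [String.ofList cur], [], none) := by
  simp [pvAStep]

lemma pvAStep_none_other (segs : List String) (cur : List Char) (c : Char)
    (h1 : (c == '"' || c == '\'') = false) (h2 : (c == ';') = false) :
    pvAStep (segs, cur, none) c = (segs, cur ++ [c], none) := by
  simp [pvAStep, h1, h2]

lemma pvAStep_some_close (segs : List String) (cur : List Char) (q c : Char)
    (h : (c == q) = true) :
    pvAStep (segs, cur, some q) c = (segs, cur ++ [c], none) := by
  simp [pvAStep, h]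

-- step-reduction lemmas for B's skip-scan
lemma pvBLoop_quote (c : Char) (rest buf : List Char)
    (hq : (c == '"' || c == '\'') = true) :
    pvBLoop (c :: rest) buf =
      (match rest.dropWhile (fun x => !(x == c)) with
       | [] => [String.ofList (buf ++ c :: rest.takeWhile (fun x => !(x == c)))]
       | q :: rest' => pvBLoop rest' (buf ++ c :: (rest.takeWhile (fun x => !(x == c)) ++ [q]))) := by
  rw [pvBLoop, if_pos hq]
  split <;> rename_i heq <;> rw [heq]

lemma pvBLoop_semi (rest buf : List Char) :
    pvBLoop (';' :: rest) buf = String.ofList buf :: pvBLoop rest [] := by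
  rw [pvBLoop, if_neg (by decide), if_pos (by decide)]

lemma pvBLoop_other (c : Char) (rest buf : List Char)
    (h1 : (c == '"' || c == '\'') = false) (h2 : (c == ';') = false) :
    pvBLoop (c :: rest) buf = pvBLoop rest (buf ++ [c]) := by
  rw [pvBLoop, if_neg (by simp [h1]), if_neg (by simp [h2])]

-- folding A's step over characters that do not close the quote just appends them
lemma pvA_quoted (q : Char) :
    ∀ (pre : List Char), (∀ x ∈ pre, (x == q) = false) →
    ∀ (segs : List String) (cur : List Char),
      List.foldl pvAStep (segs, cur, some q) pre = (segs, cur ++ pre, some q) := by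
  intro pre
  induction pre with
  | nil => intro _ segs cur; simp
  | cons x xs ih =>
      intro h segs cur
      have hx : (x == q) = false := h x (by simp)
      rw [List.foldl_cons]
      have hstep : pvAStep (segs, cur, some q) x = (segs, cur ++ [x], some q) := by
        simp [pvAStep, hx]
      rw [hstep, ih (fun y hy => h y (by simp [hy])) segs (cur ++ [x])]
      simp

-- main invariant: A's fold from a quote-free state with pending buffer buf and
-- emitted segments segs equals segs ++ B's skip-scan started at buf
lemma pv_equiv : ∀ (n : Nat) (l : List Char), l.length ≤ n →
    ∀ (buf : List Char) (segs : List String),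
    pvAFin (List.foldl pvAStep (segs, buf, none) l) = segs ++ pvBLoop l buf := by
  intro n
  induction n with
  | zero =>
      intro l hl buf segs
      have : l = [] := List.eq_nil_of_length_eq_zero (Nat.le_zero.mp hl)
      subst this
      rw [List.foldl_nil, pvBLoop]
      by_cases hb : buf = [] <;> simp [pvAFin, hb]
  | succ n ih =>
      intro l hl buf segs
      match l with
      | [] =>
          rw [List.foldl_nil, pvBLoop]
          by_cases hb : buf = [] <;> simp [pvAFin, hb]
      | c :: rest =>
          by_cases hq : (c == '"' || c == '\'') = true
          · -- quote: A enters quoted mode; split rest at the closing quote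
            have hsplit : rest.takeWhile (fun x => !(x == c)) ++
                rest.dropWhile (fun x => !(x == c)) = rest :=
              List.takeWhile_append_dropWhile
            have hprem : ∀ x ∈ rest.takeWhile (fun x => !(x == c)), (x == c) = false := by
              intro x hx
              simpa using List.mem_takeWhile_imp hx
            rw [List.foldl_cons, pvAStep_none_quote segs buf c hq]
            rw [pvBLoop_quote c rest buf hq]
            rw [show (List.foldl pvAStep (segs, buf ++ [c], some c) rest) =
                  List.foldl pvAStep (segs, buf ++ [c], some c)
                    (rest.takeWhile (fun x => !(x == c)) ++
                     rest.dropWhile (fun x => !(x == c))) by rw [hsplit]]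
            rw [List.foldl_append, pvA_quoted c _ hprem segs (buf ++ [c])]
            cases hd : rest.dropWhile (fun x => !(x == c)) with
            | nil =>
                rw [List.foldl_nil]
                simp [pvAFin]
            | cons q rest' =>
                have hqc : (q == c) = true := by
                  have := List.head?_dropWhile_not (fun x => !(x == c)) rest
                  rw [hd] at this
                  simpa using this
                rw [List.foldl_cons, pvAStep_some_close segs _ c q hqc]
                have hlen : rest'.length ≤ n := by
                  have h1 : (rest.dropWhile (fun x => !(x == c))).length ≤ rest.length :=
                    List.length_dropWhile_le _ _
                  rw [hd] at h1
                  simp at h1 hl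
                  omega
                rw [ih rest' hlen _ segs]
                simp
          · have hq' : (c == '"' || c == '\'') = false := by simpa using hq
            by_cases hs : (c == ';') = true
            · have hc : c = ';' := by simpa using hs
              subst hc
              rw [List.foldl_cons, pvAStep_none_semi segs buf]
              rw [ih rest (by simp at hl; omega) [] (segs ++ [String.ofList buf])]
              rw [pvBLoop_semi]
              simp
            · have hs' : (c == ';') = false := by simpa using hs
              rw [List.foldl_cons, pvAStep_none_other segs buf c hq' hs']
              rw [ih rest (by simp at hl; omega) (buf ++ [c]) segs]
              rw [pvBLoop_other c rest buf hq' hs']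

-- ===== VERDICT (by name: the statement is the Claim_ definition above) =====
theorem split_connection_string_py_spec : Claim_equal_split_connection_string_py := by
  intro cs _
  unfold Spec_split_connection_string_py split_connection_string_py split_connection_string_py_alt
  have := pv_equiv cs.toList.length cs.toList (le_refl _) [] []
  simpa [pvAFin] using this
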